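-- pv_equiv track=rewrite | github.com/LegendaryCorn/Resilient_MTSP | solvers/solver.py | chrom_to_path
-- ===== SOURCE A (Python) =====
-- def chrom_to_path(chrom, pts_start, num_paths):
--     paths = []
--
--     for x in range(num_paths):
--         if pts_start:
--             paths.append([pts_start[x]])
--         else:
--             paths.append([])
--
--     i = 0
--     for chrom_val in chrom:
--         if chrom_val < 0:
--             i += 1
--         else:
--             paths[i].append(chrom_val)
--     return paths
-- ===== SOURCE B (Python) =====
-- def chrom_to_path(chrom, pts_start, num_paths):
--     # Index-based: locate the separator positions once, then build each path
--     # independently as starter + the slice of chrom between its separators.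
--     cuts = [j for j, v in enumerate(chrom) if v < 0]
--     paths = []
--     for i in range(num_paths):
--         lo = 0 if i == 0 else (cuts[i - 1] + 1 if i - 1 < len(cuts) else len(chrom))
--         hi = cuts[i] if i < len(cuts) else len(chrom)
--         starter = [pts_start[i]] if pts_start else []
--         paths.append(starter + chrom[lo:hi])
--     return paths
-- ===== Notes on version B (the rewrite author's own statement) =====
-- stated objective: alternative
-- what changed: B precomputes the list of separator positions once and then builds each of the num_paths paths independently as starter plus a slice of chrom between consecutive separator positions, replacing A's stateful single pass that appends genes one at a time into a growing path list.
import Mathlib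
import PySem

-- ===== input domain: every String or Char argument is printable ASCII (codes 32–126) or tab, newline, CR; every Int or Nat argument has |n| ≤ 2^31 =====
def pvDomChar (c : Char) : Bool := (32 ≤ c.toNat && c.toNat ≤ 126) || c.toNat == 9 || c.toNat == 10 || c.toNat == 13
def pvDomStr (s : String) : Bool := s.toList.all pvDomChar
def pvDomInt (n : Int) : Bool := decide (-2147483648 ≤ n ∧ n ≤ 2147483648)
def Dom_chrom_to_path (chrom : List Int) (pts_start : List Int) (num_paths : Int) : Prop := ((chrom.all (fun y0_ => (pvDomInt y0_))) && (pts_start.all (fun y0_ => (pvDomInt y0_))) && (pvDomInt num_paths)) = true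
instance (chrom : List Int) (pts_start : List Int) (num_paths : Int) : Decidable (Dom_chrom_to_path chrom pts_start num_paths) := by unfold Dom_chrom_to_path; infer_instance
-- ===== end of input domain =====

-- B locates the separator positions once and builds each path independently from a slice of chrom; same result on Pre_ (where A returns).

-- ===== PORT A =====
-- index out of range in Python raises IndexError; here pyGetD/List.modify are total — Pre_ excludes those inputs
def chrom_to_path (chrom : List Int) (pts_start : List Int) (num_paths : Int) : List (List Int) :=
  let paths : List (List Int) :=
    (PySem.List.pyRange 0 num_paths 1).foldl
      (fun ps x =>
        if pts_start.isEmpty then ps ++ [[]]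
        else ps ++ [[PySem.List.pyGetD pts_start x 0]]) []
  (chrom.foldl
    (fun (st : List (List Int) × Nat) chrom_val =>
      if chrom_val < 0 then (st.1, st.2 + 1)
      else (st.1.modify st.2 (fun p => p ++ [chrom_val]), st.2))
    (paths, 0)).1

-- ===== PORT B =====
-- the body of B's loop: starter + chrom[lo:hi] for path index i (cuts = separator positions)
def pvAltBody (chrom : List Int) (pts_start : List Int) (cuts : List Int) (i : Int) : List Int :=
  let lo : Int := if i = 0 then 0 else
    (if i - 1 < (cuts.length : Int) then PySem.List.pyGetD cuts (i - 1) 0 + 1 else (chrom.length : Int))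
  let hi : Int := if i < (cuts.length : Int) then PySem.List.pyGetD cuts i 0 else (chrom.length : Int)
  let starter : List Int := if pts_start.isEmpty then [] else [PySem.List.pyGetD pts_start i 0]
  starter ++ PySem.List.slice chrom (some lo) (some hi)

-- cuts = [j for j, v in enumerate(chrom) if v < 0]; pts_start[i] is pyGetD (Pre_ excludes the IndexError)
def chrom_to_path_alt (chrom : List Int) (pts_start : List Int) (num_paths : Int) : List (List Int) :=
  let cuts : List Int := ((PySem.List.enumerate chrom 0).filter (fun p => decide (p.2 < 0))).map Prod.fst
  (PySem.List.pyRange 0 num_paths 1).foldl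
    (fun ps i => ps ++ [pvAltBody chrom pts_start cuts i]) []

-- ===== PRECONDITION & SPEC =====
-- Pre_ excludes exactly the inputs where Python A raises IndexError: a starter index beyond
-- pts_start (nonempty pts_start shorter than num_paths), or a nonnegative gene preceded by
-- at least num_paths separators.
def Pre_chrom_to_path (chrom : List Int) (pts_start : List Int) (num_paths : Int) : Prop :=
  (pts_start = [] ∨ num_paths ≤ (pts_start.length : Int)) ∧
  (∀ j ∈ List.range chrom.length, 0 ≤ chrom.getD j 0 →
      (((chrom.take j).countP (fun v => decide (v < 0)) : Int) < num_paths))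
instance (chrom : List Int) (pts_start : List Int) (num_paths : Int) : Decidable (Pre_chrom_to_path chrom pts_start num_paths) := by unfold Pre_chrom_to_path; infer_instance

def pvWitness_chrom_to_path : List Int × List Int × Int := ([3, -1, 4, 1, -2, 5], [7, 8, 9], 3)

def Spec_chrom_to_path (chrom : List Int) (pts_start : List Int) (num_paths : Int) (out : List (List Int)) : Prop := out = chrom_to_path_alt chrom pts_start num_paths
instance (chrom : List Int) (pts_start : List Int) (num_paths : Int) (out : List (List Int)) : Decidable (Spec_chrom_to_path chrom pts_start num_paths out) := by unfold Spec_chrom_to_path; infer_instance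

-- ===== CLAIM (what is proved, stated in full; the proofs are below) =====
def Claim_equal_chrom_to_path : Prop := ∀ (chrom : List Int) (pts_start : List Int) (num_paths : Int), Dom_chrom_to_path chrom pts_start num_paths → Pre_chrom_to_path chrom pts_start num_paths → Spec_chrom_to_path chrom pts_start num_paths (chrom_to_path chrom pts_start num_paths)

-- ===== LEMMAS AND PROOFS =====

-- segments of the chromosome, computed back-to-front (spec form)
def pvSegRec : List Int → List (List Int)
  | [] => [[]]
  | v :: t =>
    if v < 0 then [] :: pvSegRec t
    else match pvSegRec t with
      | [] => [[v]]
      | s :: r => (v :: s) :: r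

-- apply segments to the path list starting at index k
def pvApplyFrom (P : List (List Int)) (k : Nat) : List (List Int) → List (List Int)
  | [] => P
  | s :: r => pvApplyFrom (P.modify k (fun q => q ++ s)) (k + 1) r

-- positions of the negative entries
def pvNegPos : List Int → List Nat
  | [] => []
  | v :: t => if v < 0 then 0 :: (pvNegPos t).map (· + 1) else (pvNegPos t).map (· + 1)

def pvCutsSpec (chrom : List Int) : List Int := (pvNegPos chrom).map Int.ofNat

def pvLoN (chrom : List Int) : Nat → Nat
  | 0 => 0
  | i + 1 => if i < (pvNegPos chrom).length then (pvNegPos chrom).getD i 0 + 1 else chrom.length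

def pvHiN (chrom : List Int) (i : Nat) : Nat :=
  if i < (pvNegPos chrom).length then (pvNegPos chrom).getD i 0 else chrom.length

theorem pvSegRec_ne_nil (l : List Int) : pvSegRec l ≠ [] := by
  cases l with
  | nil => simp [pvSegRec]
  | cons v t =>
    simp only [pvSegRec]
    split
    · simp
    · split <;> simp

theorem pvModify_append_nil {α : Type} (l : List (List α)) (k : Nat) :
    l.modify k (fun q => q ++ ([] : List α)) = l := by
  have h : (fun q : List α => q ++ ([] : List α)) = id := by funext q; simp
  rw [h, List.modify_id]

theorem pvModify_modify {α : Type} (l : List α) (k : Nat) (f g : α → α) :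
    (l.modify k f).modify k g = l.modify k (g ∘ f) := by
  induction l generalizing k with
  | nil => simp
  | cons x t ih =>
    cases k with
    | zero => simp
    | succ n => simp [ih]

-- A's main loop equals applying the segments
theorem pvAloop_eq (chrom : List Int) (P : List (List Int)) (k : Nat) :
    (chrom.foldl
      (fun (st : List (List Int) × Nat) chrom_val =>
        if chrom_val < 0 then (st.1, st.2 + 1)
        else (st.1.modify st.2 (fun p => p ++ [chrom_val]), st.2))
      (P, k)).1 = pvApplyFrom P k (pvSegRec chrom) := by
  induction chrom generalizing P k with
  | nil =>
    simp only [List.foldl_nil, pvSegRec, pvApplyFrom]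
    rw [pvModify_append_nil]
  | cons v t ih =>
    by_cases hv : v < 0
    · simp only [List.foldl_cons, if_pos hv, pvSegRec]
      rw [ih]
      simp only [pvApplyFrom]
      rw [pvModify_append_nil]
    · simp only [List.foldl_cons, if_neg hv, pvSegRec]
      rw [ih]
      rcases h : pvSegRec t with _ | ⟨s, r⟩
      · exact absurd h (pvSegRec_ne_nil t)
      · simp only [pvApplyFrom, pvModify_modify]
        congr 2
        funext q
        simp

-- element description of pvApplyFrom
theorem pvApplyFrom_getElem? (segs P : List (List Int)) (k i : Nat) :
    (pvApplyFrom P k segs)[i]? =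
      (P[i]?).map (fun p => if k ≤ i then p ++ segs.getD (i - k) [] else p) := by
  induction segs generalizing P k with
  | nil =>
    simp only [pvApplyFrom]
    cases h : P[i]? with
    | none => simp
    | some p => simp
  | cons s r ih =>
    simp only [pvApplyFrom, ih, List.getElem?_modify]
    cases h : P[i]? with
    | none => simp
    | some p =>
      simp only [Option.map_some]
      by_cases h1 : i < k
      · have : ¬ k + 1 ≤ i := by omega
        have : ¬ k ≤ i := by omega
        simp [*, show ¬ (k = i) by omega]
      · by_cases h2 : i = k
        · subst h2
          simp [show ¬ (i + 1 ≤ i) by omega]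
        · have hk : k + 1 ≤ i := by omega
          have hk' : k ≤ i := by omega
          have hsub : i - k = (i - (k + 1)) + 1 := by omega
          simp [show ¬ (k = i) by omega, hk, hk', hsub]

-- the i-th segment of pvSegRec is a slice between separator positions
theorem pvSeg_getD_eq (chrom : List Int) (i : Nat) :
    (pvSegRec chrom).getD i [] =
      (chrom.drop (pvLoN chrom i)).take (pvHiN chrom i - pvLoN chrom i) := by
  induction chrom generalizing i with
  | nil =>
    cases i <;> simp [pvSegRec, pvLoN, pvHiN, pvNegPos]
  | cons v t ih =>
    by_cases hv : v < 0
    · have hnp : pvNegPos (v :: t) = 0 :: (pvNegPos t).map (· + 1) := by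
        simp [pvNegPos, hv]
      cases i with
      | zero =>
        simp [pvSegRec, hv, pvLoN, pvHiN, hnp]
      | succ j =>
        have hlo : pvLoN (v :: t) (j + 1) = pvLoN t j + 1 := by
          cases j with
          | zero => simp [pvLoN, hnp]
          | succ m =>
            simp only [pvLoN, hnp, List.length_cons, List.length_map]
            by_cases hm : m < (pvNegPos t).length
            · simp [show m + 1 < (pvNegPos t).length + 1 by omega, hm]
            · simp [show ¬ (m + 1 < (pvNegPos t).length + 1) by omega, hm]
        have hhi : pvHiN (v :: t) (j + 1) = pvHiN t j + 1 := by
          simp only [pvHiN, hnp, List.length_cons, List.length_map]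
          by_cases hm : j < (pvNegPos t).length
          · simp [show j + 1 < (pvNegPos t).length + 1 by omega, hm]
          · simp [show ¬ (j + 1 < (pvNegPos t).length + 1) by omega, hm]
        have hstep : (pvSegRec (v :: t)).getD (j + 1) [] = (pvSegRec t).getD j [] := by
          simp [pvSegRec, hv]
        rw [hstep, ih, hlo, hhi]
        simp [List.drop_succ_cons, Nat.succ_sub_succ]
    · have hnp : pvNegPos (v :: t) = (pvNegPos t).map (· + 1) := by
        simp [pvNegPos, hv]
      rcases hseg : pvSegRec t with _ | ⟨s, r⟩
      · exact absurd hseg (pvSegRec_ne_nil t)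
      cases i with
      | zero =>
        have hhi : pvHiN (v :: t) 0 = pvHiN t 0 + 1 := by
          simp only [pvHiN, hnp, List.length_cons, List.length_map]
          by_cases hm : 0 < (pvNegPos t).length
          · simp [hm]
          · simp [hm]
        have h0 : (pvSegRec (v :: t)).getD 0 [] = v :: (pvSegRec t).getD 0 [] := by
          simp [pvSegRec, hv, hseg]
        rw [h0, ih, hhi]
        simp [pvLoN, List.take_succ_cons]
      | succ j =>
        have hlo : pvLoN (v :: t) (j + 1) = pvLoN t (j + 1) + 1 := by
          simp only [pvLoN, hnp, List.length_cons, List.length_map]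
          by_cases hm : j < (pvNegPos t).length
          · simp [hm]
          · simp [hm]
        have hhi : pvHiN (v :: t) (j + 1) = pvHiN t (j + 1) + 1 := by
          simp only [pvHiN, hnp, List.length_cons, List.length_map]
          by_cases hm : j + 1 < (pvNegPos t).length
          · simp [hm]
          · simp [hm]
        have hstep : (pvSegRec (v :: t)).getD (j + 1) [] = (pvSegRec t).getD (j + 1) [] := by
          simp [pvSegRec, hv, hseg]
        rw [hstep, ih, hlo, hhi]
        simp [List.drop_succ_cons, Nat.succ_sub_succ]

-- B's cuts list is the cast of the separator positions
theorem pvCuts_eq (chrom : List Int) (s : Int) :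
    ((PySem.List.enumerate chrom s).filter (fun p => decide (p.2 < 0))).map Prod.fst
      = (pvNegPos chrom).map (fun j => Int.ofNat j + s) := by
  induction chrom generalizing s with
  | nil => simp [PySem.List.enumerate_nil, pvNegPos]
  | cons v t ih =>
    rw [PySem.List.enumerate_cons]
    have hf : ((fun j => Int.ofNat j + s) ∘ (· + 1)) = (fun j : Nat => Int.ofNat j + (s + 1)) := by
      funext j
      simp only [Function.comp_apply, Int.ofNat_eq_natCast]
      push_cast
      ring
    by_cases hv : v < 0
    · simp only [List.filter_cons]
      rw [if_pos (by simp [hv])]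
      simp only [List.map_cons]
      rw [ih]
      simp only [pvNegPos, if_pos hv, List.map_cons, List.map_map, hf]
      simp [Int.ofNat_eq_natCast]
    · simp only [List.filter_cons]
      rw [if_neg (by simp [hv])]
      rw [ih]
      simp only [pvNegPos, if_neg hv, List.map_map, hf]

theorem pvCuts_eq_zero (chrom : List Int) :
    ((PySem.List.enumerate chrom 0).filter (fun p => decide (p.2 < 0))).map Prod.fst
      = pvCutsSpec chrom := by
  rw [pvCuts_eq, pvCutsSpec]
  simp

-- a fold appending one element per item is a map
theorem pvFoldl_append_map {α β : Type} (f : α → β) (l : List α) (acc : List β) :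
    l.foldl (fun ps x => ps ++ [f x]) acc = acc ++ l.map f := by
  induction l generalizing acc with
  | nil => simp
  | cons x t ih => simp [ih]

-- A's starter-path build equals the map form
theorem pvInit_eq (pts_start : List Int) (rng : List Int) (acc : List (List Int)) :
    rng.foldl
      (fun ps x =>
        if pts_start.isEmpty then ps ++ [[]]
        else ps ++ [[PySem.List.pyGetD pts_start x 0]]) acc
    = acc ++ rng.map (fun x => if pts_start.isEmpty then [] else [PySem.List.pyGetD pts_start x 0]) := by
  have hstep : (fun (ps : List (List Int)) (x : Int) =>
        if pts_start.isEmpty then ps ++ [[]]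
        else ps ++ [[PySem.List.pyGetD pts_start x 0]])
      = fun ps x => ps ++ [if pts_start.isEmpty then [] else [PySem.List.pyGetD pts_start x 0]] := by
    funext ps x; split <;> rfl
  rw [hstep, pvFoldl_append_map]

-- B's loop body at path index k is starter ++ the k-th segment
theorem pvAltBody_eq (chrom pts_start : List Int) (k : Nat) :
    pvAltBody chrom pts_start (pvCutsSpec chrom) ((k : Nat) : Int)
      = (if pts_start.isEmpty then [] else [PySem.List.pyGetD pts_start ((k : Nat) : Int) 0])
        ++ (pvSegRec chrom).getD k [] := by
  simp only [pvAltBody, pvCutsSpec]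
  have hlo : (if ((k : Nat) : Int) = 0 then 0 else
        (if ((k : Nat) : Int) - 1 < (((pvNegPos chrom).map Int.ofNat).length : Int)
         then PySem.List.pyGetD ((pvNegPos chrom).map Int.ofNat) (((k : Nat) : Int) - 1) 0 + 1
         else (chrom.length : Int))) = ((pvLoN chrom k : Nat) : Int) := by
    cases k with
    | zero => simp [pvLoN]
    | succ j =>
      rw [if_neg (by push_cast; omega)]
      rw [show ((j + 1 : Nat) : Int) - 1 = ((j : Nat) : Int) by push_cast; ring]
      simp only [List.length_map, PySem.List.pyGetD_natCast]
      by_cases hm : j < (pvNegPos chrom).length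
      · rw [if_pos (by exact_mod_cast hm)]
        rw [show (0 : Int) = Int.ofNat 0 from rfl, List.getD_map _ 0 Int.ofNat]
        simp only [pvLoN, if_pos hm, Int.ofNat_eq_natCast]
        push_cast
        ring
      · rw [if_neg (by exact_mod_cast hm)]
        simp [pvLoN, hm]
  have hhi : (if ((k : Nat) : Int) < (((pvNegPos chrom).map Int.ofNat).length : Int)
         then PySem.List.pyGetD ((pvNegPos chrom).map Int.ofNat) ((k : Nat) : Int) 0
         else (chrom.length : Int)) = ((pvHiN chrom k : Nat) : Int) := by
    simp only [List.length_map, PySem.List.pyGetD_natCast]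
    by_cases hm : k < (pvNegPos chrom).length
    · rw [if_pos (by exact_mod_cast hm)]
      rw [show (0 : Int) = Int.ofNat 0 from rfl, List.getD_map _ 0 Int.ofNat]
      simp [pvHiN, hm, Int.ofNat_eq_natCast]
    · rw [if_neg (by exact_mod_cast hm)]
      simp [pvHiN, hm]
  rw [hlo, hhi, PySem.List.slice_natCast, pvSeg_getD_eq]

-- ===== VERDICT (by name: the statement is the Claim_ definition above) =====
theorem chrom_to_path_spec : Claim_equal_chrom_to_path := by
  intro chrom pts_start num_paths _hdom _hpre
  unfold Spec_chrom_to_path chrom_to_path chrom_to_path_alt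
  rw [pvAloop_eq, pvInit_eq, List.nil_append, pvFoldl_append_map, List.nil_append,
    pvCuts_eq_zero]
  apply List.ext_getElem?
  intro i
  rw [pvApplyFrom_getElem?, PySem.List.pyRange_one]
  simp only [List.getElem?_map]
  by_cases hi : i < (num_paths - 0).toNat
  · rw [List.getElem?_range hi]
    simp only [Option.map_some, Option.some.injEq, zero_add, Nat.zero_le, if_pos, Nat.sub_zero]
    rw [pvAltBody_eq]
  · rw [List.getElem?_eq_none_iff.mpr (by simpa using hi)]
    simp
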